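-- pv_equiv track=rewrite | github.com/oxhead/CodingYourWay | src/lt_383.py | canConstruct_naive
-- ===== SOURCE A (Python) =====
-- def canConstruct_naive(ransomNote, magazine):
--     """
--     :type ransomNote: str
--     :type magazine: str
--     :rtype: bool
--     """
--     letters = {}
--     for c in magazine:
--         if c not in letters:
--             letters[c] = 0
--         letters[c] += 1
--     for c in ransomNote:
--         if c in letters and letters[c] > 0:
--             letters[c] -= 1
--         else:
--             return False
--     return True
-- ===== SOURCE B (Python) =====
-- def canConstruct_naive(ransomNote, magazine):
--     need = {}
--     for c in ransomNote:
--         need[c] = need.get(c, 0) + 1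
--     have = {}
--     for c in magazine:
--         have[c] = have.get(c, 0) + 1
--     return all(need[c] <= have.get(c, 0) for c in need)
-- ===== Notes on version B (the rewrite author's own statement) =====
-- stated objective: simpler
-- what changed: Replaces A's stateful decrement-and-early-return scan of ransomNote with a count-both-then-compare decomposition: two frequency tables and one comparison over distinct ransom letters.
import Mathlib
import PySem

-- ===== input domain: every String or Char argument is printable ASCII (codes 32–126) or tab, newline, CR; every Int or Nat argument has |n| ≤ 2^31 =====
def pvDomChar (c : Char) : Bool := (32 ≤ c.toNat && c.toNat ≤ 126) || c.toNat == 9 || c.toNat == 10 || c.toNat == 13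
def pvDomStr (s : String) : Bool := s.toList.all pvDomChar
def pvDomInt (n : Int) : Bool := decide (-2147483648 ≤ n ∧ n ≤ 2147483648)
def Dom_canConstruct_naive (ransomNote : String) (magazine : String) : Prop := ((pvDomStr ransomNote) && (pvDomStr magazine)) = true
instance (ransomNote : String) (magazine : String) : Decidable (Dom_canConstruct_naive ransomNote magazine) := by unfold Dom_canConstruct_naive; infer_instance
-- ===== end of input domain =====

-- B replaces A's decrement-and-early-return scan of ransomNote with a count-both-then-compare
-- decomposition (two frequency tables, then one comparison over distinct ransom letters); objective: simpler.

-- ===== PORT A =====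
-- A's second loop: for c in ransomNote: decrement or return False
def canConstructCheck (letters : PySem.Dict Char Int) : List Char → Bool
  | [] => true
  | c :: rest =>
    if letters.contains c && decide (letters.getD c 0 > 0) then
      canConstructCheck (letters.insert c (letters.getD c 0 - 1)) rest
    else
      false

def canConstruct_naive (ransomNote : String) (magazine : String) : Bool :=
  -- first loop: build letters with 'if c not in letters: letters[c] = 0; letters[c] += 1'
  let letters := magazine.toList.foldl
    (fun d c =>
      let d := if d.contains c then d else d.insert c 0
      d.insert c (d.getD c 0 + 1))
    PySem.Dict.empty
  canConstructCheck letters ransomNote.toList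

-- ===== PORT B =====
def canConstruct_naive_alt (ransomNote : String) (magazine : String) : Bool :=
  let need := ransomNote.toList.foldl (fun d c => d.insert c (d.getD c 0 + 1)) (PySem.Dict.empty : PySem.Dict Char Int)
  let haveD := magazine.toList.foldl (fun d c => d.insert c (d.getD c 0 + 1)) (PySem.Dict.empty : PySem.Dict Char Int)
  need.keys.all (fun c => decide (need.getD c 0 ≤ haveD.getD c 0))

-- ===== PRECONDITION & SPEC =====
def Spec_canConstruct_naive (ransomNote : String) (magazine : String) (out : Bool) : Prop := out = canConstruct_naive_alt ransomNote magazine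
instance (ransomNote : String) (magazine : String) (out : Bool) : Decidable (Spec_canConstruct_naive ransomNote magazine out) := by unfold Spec_canConstruct_naive; infer_instance

-- ===== CLAIM (what is proved, stated in full; the proofs are below) =====
def Claim_equal_canConstruct_naive : Prop := ∀ (ransomNote : String) (magazine : String), Dom_canConstruct_naive ransomNote magazine → Spec_canConstruct_naive ransomNote magazine (canConstruct_naive ransomNote magazine)

-- ===== LEMMAS AND PROOFS =====

-- A's first loop counts like a plain counter: the 'insert 0 first' step does not change any getD.
theorem getD_buildA (l : List Char) (d : PySem.Dict Char Int) (x : Char) :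
    (l.foldl (fun d c =>
        let d := if d.contains c then d else d.insert c 0
        d.insert c (d.getD c 0 + 1)) d).getD x 0 = d.getD x 0 + l.count x := by
  induction l generalizing d with
  | nil => simp
  | cons c rest ih =>
    simp only [List.foldl_cons, ih, List.count_cons]
    by_cases hc : d.contains c = true
    · simp only [hc, if_true, PySem.Dict.getD_insert]
      rcases eq_or_ne x c with rfl | hne
      · simp; ring
      · simp [hne, Ne.symm hne]
    · have h0 : d.getD c 0 = 0 := by
        rw [PySem.Dict.getD_of_not_contains]
        simp_all
      simp only [hc, Bool.false_eq_true, if_false, PySem.Dict.getD_insert]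
      rcases eq_or_ne x c with rfl | hne
      · simp [h0]; ring
      · simp [hne, Ne.symm hne]

-- A's second loop succeeds iff every letter's demand is within the (nonnegative) table.
theorem canConstructCheck_iff (rs : List Char) (d : PySem.Dict Char Int)
    (h0 : ∀ x : Char, 0 ≤ d.getD x 0) :
    canConstructCheck d rs = true ↔ ∀ x : Char, (rs.count x : Int) ≤ d.getD x 0 := by
  induction rs generalizing d with
  | nil => simpa [canConstructCheck] using h0
  | cons c rest ih =>
    simp only [canConstructCheck]
    have hcond : (d.contains c && decide (d.getD c 0 > 0)) = decide (0 < d.getD c 0) := by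
      by_cases hc : d.contains c = true
      · simp [hc, gt_iff_lt]
      · have hz : d.getD c 0 = 0 := by
          rw [PySem.Dict.getD_of_not_contains]; simp_all
        simp [hc, hz]
    rw [hcond]
    have hins : ∀ x : Char, (d.insert c (d.getD c 0 - 1)).getD x 0
        = if x = c then d.getD c 0 - 1 else d.getD x 0 :=
      fun x => PySem.Dict.getD_insert d c x _ 0
    have hcnt : ∀ x : Char, ((c :: rest).count x : Int)
        = (rest.count x : Int) + if x = c then 1 else 0 := by
      intro x
      rw [List.count_cons]
      by_cases hxc : x = c
      · simp [hxc]
      · simp [hxc]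
        exact fun h => hxc h.symm
    by_cases hpos : 0 < d.getD c 0
    · have h0' : ∀ x : Char, 0 ≤ (d.insert c (d.getD c 0 - 1)).getD x 0 := by
        intro x
        rw [hins]
        split_ifs with hxc
        · omega
        · exact h0 x
      simp only [hpos, decide_true, if_true, ih _ h0']
      constructor
      · intro h x
        have hx := h x
        rw [hins] at hx
        rw [hcnt]
        by_cases hxc : x = c
        · rw [if_pos hxc] at hx; rw [if_pos hxc]; subst hxc; omega
        · rw [if_neg hxc] at hx; rw [if_neg hxc]; omega
      · intro h x
        have hx := h x
        rw [hcnt] at hx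
        rw [hins]
        by_cases hxc : x = c
        · rw [if_pos hxc] at hx; rw [if_pos hxc]; subst hxc; omega
        · rw [if_neg hxc] at hx; rw [if_neg hxc]; omega
    · simp only [hpos, decide_false, Bool.false_eq_true, if_false, false_iff]
      intro h
      have := h c
      rw [hcnt c, if_pos rfl] at this
      have hc0 : (0:Int) ≤ rest.count c := by positivity
      omega

-- ===== VERDICT (by name: the statement is the Claim_ definition above) =====
theorem canConstruct_naive_spec : Claim_equal_canConstruct_naive := by
  intro r m _
  show canConstruct_naive r m = canConstruct_naive_alt r m
  unfold canConstruct_naive canConstruct_naive_alt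
  simp only [PySem.Dict.foldl_insert_getD_add_one_eq_counter]
  have h0 : ∀ x : Char,
      (0 : Int) ≤ (m.toList.foldl (fun d c =>
        let d := if d.contains c then d else d.insert c 0
        d.insert c (d.getD c 0 + 1)) PySem.Dict.empty).getD x 0 := by
    intro x
    rw [getD_buildA]
    simp only [PySem.Dict.getD_empty, zero_add]
    positivity
  rw [Bool.eq_iff_iff, canConstructCheck_iff _ _ h0, List.all_eq_true]
  constructor
  · intro h c hc
    have := h c
    rw [getD_buildA] at this
    simp only [PySem.Dict.getD_empty, zero_add] at this
    simpa [PySem.Dict.getD_counter] using this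
  · intro h x
    rw [getD_buildA]
    simp only [PySem.Dict.getD_empty, zero_add]
    by_cases hx : x ∈ r.toList
    · have := h x (by rw [PySem.Dict.keys_counter]; exact (PySem.Set.mem_ofList _ _).mpr hx)
      simpa [PySem.Dict.getD_counter] using this
    · have hz : r.toList.count x = 0 := List.count_eq_zero.mpr hx
      rw [hz]
      push_cast
      positivity
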